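-- pv_equiv track=rewrite | github.com/JayrajSarda/Asset-Acquisition | Flag Conditions and Location Coord Pull.py | flag_count
-- ===== SOURCE A (Python) =====
-- def flag_count(final_list):
--     count = 0
--     for b in final_list:
--         if b["vacant"] == 1 and b["tax_deliquent"] == 1:
--            count = 2
--         elif b["tax_deliquent"] == 1 or b["vacant"] == 1:
--             count = 1
--         else:
--             count = 0
--         b["flag_count"] = count
--         count = 0
--
--     return final_list
-- ===== SOURCE B (Python) =====
-- def flag_count(final_list):
--     # Staged passes: first pass initialises flag_count from "vacant",
--     # second pass increments it where "tax_deliquent" == 1.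
--     for b in final_list:
--         b["flag_count"] = 1 if b["vacant"] == 1 else 0
--     for b in final_list:
--         if b["tax_deliquent"] == 1:
--             b["flag_count"] += 1
--     return final_list
-- ===== Notes on version B (the rewrite author's own statement) =====
-- stated objective: alternative
-- what changed: Replaces the single-pass if/elif/else cascade with two staged passes: the first pass initialises flag_count from the vacant indicator, the second pass increments it in place where tax_deliquent == 1.
import Mathlib
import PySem

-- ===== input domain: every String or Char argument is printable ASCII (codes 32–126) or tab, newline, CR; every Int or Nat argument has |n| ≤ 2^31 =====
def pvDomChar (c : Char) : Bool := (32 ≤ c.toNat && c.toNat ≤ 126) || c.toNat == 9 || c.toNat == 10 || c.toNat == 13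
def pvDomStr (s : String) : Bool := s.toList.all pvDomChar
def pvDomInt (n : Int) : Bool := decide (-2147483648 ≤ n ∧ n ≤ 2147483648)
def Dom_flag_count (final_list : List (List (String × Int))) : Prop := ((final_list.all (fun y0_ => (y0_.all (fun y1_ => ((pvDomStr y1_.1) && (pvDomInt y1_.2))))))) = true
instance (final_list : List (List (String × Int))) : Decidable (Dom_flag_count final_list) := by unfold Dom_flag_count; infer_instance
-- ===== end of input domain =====

-- B replaces A's single pass with an if/elif/else cascade by two staged passes: pass 1 sets
-- flag_count from the vacant indicator, pass 2 increments it in place where tax_deliquent == 1.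
-- Both Pythons mutate the dicts of final_list in place; the equivalence proved here is about the return value.

-- dict lookup (first match) and dict assignment (overwrite in place keeps position, new key appends) on an association list
def pvGet (b : List (String × Int)) (k : String) : Option Int :=
  match b with
  | [] => none
  | (k', v) :: t => if k' = k then some v else pvGet t k

def pvSet (b : List (String × Int)) (k : String) (v : Int) : List (String × Int) :=
  match b with
  | [] => [(k, v)]
  | (k', v') :: t => if k' = k then (k, v) :: t else (k', v') :: pvSet t k v

-- ===== PORT A =====
def flag_count (final_list : List (List (String × Int))) : List (List (String × Int)) :=
  final_list.map (fun b =>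
    let count : Int :=
      if pvGet b "vacant" = some 1 ∧ pvGet b "tax_deliquent" = some 1 then 2
      else if pvGet b "tax_deliquent" = some 1 ∨ pvGet b "vacant" = some 1 then 1
      else 0
    pvSet b "flag_count" count)

-- ===== PORT B =====
-- pass 2's `b["flag_count"] += 1`: the none branch (missing key = Python KeyError) is
-- unreachable after pass 1, which always sets "flag_count".
def flag_count_alt (final_list : List (List (String × Int))) : List (List (String × Int)) :=
  let pass1 := final_list.map (fun b =>
    pvSet b "flag_count" (if pvGet b "vacant" = some 1 then (1 : Int) else 0))
  pass1.map (fun b =>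
    if pvGet b "tax_deliquent" = some 1 then
      match pvGet b "flag_count" with
      | some v => pvSet b "flag_count" (v + 1)
      | none => b
    else b)

-- ===== PRECONDITION & SPEC =====
-- Pre_ excludes exactly the inputs on which Python A raises KeyError: a dict missing "vacant" or "tax_deliquent".
def Pre_flag_count (final_list : List (List (String × Int))) : Prop :=
  ∀ b ∈ final_list, "vacant" ∈ b.map Prod.fst ∧ "tax_deliquent" ∈ b.map Prod.fst
instance (final_list : List (List (String × Int))) : Decidable (Pre_flag_count final_list) := by unfold Pre_flag_count; infer_instance

def pvWitness_flag_count : (List (List (String × Int))) := [[("vacant", 1), ("tax_deliquent", 0)]]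

def Spec_flag_count (final_list : List (List (String × Int))) (out : List (List (String × Int))) : Prop := out = flag_count_alt final_list
instance (final_list : List (List (String × Int))) (out : List (List (String × Int))) : Decidable (Spec_flag_count final_list out) := by unfold Spec_flag_count; infer_instance

-- ===== CLAIM (what is proved, stated in full; the proofs are below) =====
def Claim_equal_flag_count : Prop := ∀ (final_list : List (List (String × Int))), Dom_flag_count final_list → Pre_flag_count final_list → Spec_flag_count final_list (flag_count final_list)

-- ===== LEMMAS AND PROOFS =====
theorem pvGet_pvSet_same (b : List (String × Int)) (k : String) (v : Int) :
    pvGet (pvSet b k v) k = some v := by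
  induction b with
  | nil => simp [pvGet, pvSet]
  | cons h t ih =>
    obtain ⟨k', v'⟩ := h
    by_cases hk : k' = k <;> simp [pvGet, pvSet, hk, ih]

theorem pvGet_pvSet_ne (b : List (String × Int)) (k k' : String) (v : Int) (h : k ≠ k') :
    pvGet (pvSet b k v) k' = pvGet b k' := by
  induction b with
  | nil => simp [pvGet, pvSet, h]
  | cons hd t ih =>
    obtain ⟨k0, v0⟩ := hd
    by_cases hk : k0 = k <;> simp [pvGet, pvSet, hk, h, ih]

theorem pvSet_pvSet (b : List (String × Int)) (k : String) (v w : Int) :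
    pvSet (pvSet b k v) k w = pvSet b k w := by
  induction b with
  | nil => simp [pvSet]
  | cons hd t ih =>
    obtain ⟨k0, v0⟩ := hd
    by_cases hk : k0 = k <;> simp [pvSet, hk, ih]

-- per-dict agreement of A's one-pass body with B's two staged passes
theorem flag_body_eq (b : List (String × Int)) :
    (let p := pvSet b "flag_count" (if pvGet b "vacant" = some 1 then (1 : Int) else 0)
     if pvGet p "tax_deliquent" = some 1 then
       match pvGet p "flag_count" with
       | some v => pvSet p "flag_count" (v + 1)
       | none => p
     else p) =
    pvSet b "flag_count"
      (if pvGet b "vacant" = some 1 ∧ pvGet b "tax_deliquent" = some 1 then (2 : Int)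
       else if pvGet b "tax_deliquent" = some 1 ∨ pvGet b "vacant" = some 1 then 1
       else 0) := by
  have htd : ("flag_count" : String) ≠ "tax_deliquent" := by decide
  by_cases h1 : pvGet b "vacant" = some 1 <;>
    by_cases h2 : pvGet b "tax_deliquent" = some 1 <;>
    simp [h1, h2, pvGet_pvSet_same, pvGet_pvSet_ne _ _ _ _ htd, pvSet_pvSet]

-- ===== VERDICT (by name: the statement is the Claim_ definition above) =====
theorem flag_count_spec : Claim_equal_flag_count := by
  intro final_list _ _
  unfold Spec_flag_count flag_count flag_count_alt
  rw [List.map_map]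
  exact (List.map_congr_left (fun b _ => (flag_body_eq b).symm))
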